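-- pv_equiv track=rewrite | github.com/acgollapalli/HxApy_Blender_import-export | hxapy_util.py | RestoreFaces
-- ===== SOURCE A (Python) =====
-- def RestoreFaces(references):
--     faces = []
--     tupl = []
--     for r in references:
--         if (r < 0):
--             r = -r - 1
--             tupl.append(r)
--             faces.append(tuple(tupl))
--             tupl = []
--         else:
--             tupl.append(r)
--     return faces
-- ===== SOURCE B (Python) =====
-- def RestoreFaces(references):
--     refs = list(references)
--     faces = []
--     start = 0
--     for i, r in enumerate(refs):
--         if r < 0:
--             faces.append(tuple(refs[start:i]) + (-r - 1,))
--             start = i + 1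
--     return faces
-- ===== Notes on version B (the rewrite author's own statement) =====
-- stated objective: alternative
-- what changed: B replaces A's grown per-face accumulator list with boundary indices: it scans with enumerate and, at each negative delimiter, emits the face as the slice refs[start:i] plus the transformed delimiter, advancing start; trailing elements after the last delimiter are dropped by construction.
import Mathlib
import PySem

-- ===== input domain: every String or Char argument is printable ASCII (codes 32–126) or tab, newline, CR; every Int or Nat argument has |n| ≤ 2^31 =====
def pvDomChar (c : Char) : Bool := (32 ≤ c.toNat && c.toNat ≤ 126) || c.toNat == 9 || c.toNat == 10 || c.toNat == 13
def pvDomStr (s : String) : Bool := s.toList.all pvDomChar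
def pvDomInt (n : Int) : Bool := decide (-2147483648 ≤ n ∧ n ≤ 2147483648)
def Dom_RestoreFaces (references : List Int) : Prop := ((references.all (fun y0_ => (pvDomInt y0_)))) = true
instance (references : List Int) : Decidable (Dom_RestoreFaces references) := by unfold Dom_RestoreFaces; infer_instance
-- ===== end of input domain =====

-- B differs from A by decomposition: boundary indices + slicing instead of a grown accumulator list; same values everywhere.

-- ===== PORT A =====
-- A: one pass keeping the current partial tuple 'tupl'; on a negative r append tupl+[-r-1] to faces and reset.
def RestoreFaces (references : List Int) : List (List Int) :=
  (references.foldl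
    (fun (st : List (List Int) × List Int) r =>
      if r < 0 then (st.1 ++ [st.2 ++ [-r - 1]], ([] : List Int))
      else (st.1, st.2 ++ [r]))
    ([], [])).1

-- ===== PORT B =====
-- B: enumerate the list; at each negative r emit the slice refs[start:i] ++ [-r-1] and set start := i+1.
def RestoreFaces_alt (references : List Int) : List (List Int) :=
  ((PySem.List.enumerate references 0).foldl
    (fun (st : List (List Int) × Int) (p : Int × Int) =>
      if p.2 < 0 then
        (st.1 ++ [PySem.List.slice references (some st.2) (some p.1) ++ [-p.2 - 1]], p.1 + 1)
      else st)
    ([], 0)).1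

-- ===== PRECONDITION & SPEC =====
def Spec_RestoreFaces (references : List Int) (out : List (List Int)) : Prop := out = RestoreFaces_alt references
instance (references : List Int) (out : List (List Int)) : Decidable (Spec_RestoreFaces references out) := by unfold Spec_RestoreFaces; infer_instance

-- ===== CLAIM (what is proved, stated in full; the proofs are below) =====
def Claim_equal_RestoreFaces : Prop := ∀ (references : List Int), Dom_RestoreFaces references → Spec_RestoreFaces references (RestoreFaces references)

-- ===== LEMMAS AND PROOFS =====

-- the common recursive characterisation: faces produced from a pending run t and remaining input
def pvCore (t : List Int) : List Int → List (List Int)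
  | [] => []
  | r :: rs => if r < 0 then (t ++ [-r - 1]) :: pvCore [] rs else pvCore (t ++ [r]) rs

theorem pvCoreA (l : List Int) : ∀ (faces : List (List Int)) (t : List Int),
    (l.foldl
      (fun (st : List (List Int) × List Int) r =>
        if r < 0 then (st.1 ++ [st.2 ++ [-r - 1]], ([] : List Int))
        else (st.1, st.2 ++ [r]))
      (faces, t)).1 = faces ++ pvCore t l := by
  induction l with
  | nil => intro faces t; simp [pvCore]
  | cons r rs ih =>
    intro faces t
    by_cases hr : r < 0
    · simp [List.foldl_cons, hr, pvCore, ih]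
    · simp [List.foldl_cons, hr, pvCore, ih]

theorem pvCoreB (refs : List Int) : ∀ (rs : List Int) (k s : Nat) (faces : List (List Int)),
    s ≤ k → refs.drop k = rs →
    ((PySem.List.enumerate rs (k : Int)).foldl
      (fun (st : List (List Int) × Int) (p : Int × Int) =>
        if p.2 < 0 then
          (st.1 ++ [PySem.List.slice refs (some st.2) (some p.1) ++ [-p.2 - 1]], p.1 + 1)
        else st)
      ((faces, (s : Int)))).1 = faces ++ pvCore ((refs.drop s).take (k - s)) rs := by
  intro rs
  induction rs with
  | nil => intro k s faces _ _; simp [pvCore]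
  | cons r rs' ih =>
    intro k s faces hsk hdrop
    have hdrop' : refs.drop (k + 1) = rs' := by
      rw [← List.tail_drop, hdrop]; rfl
    have hget : refs[k]? = some r := by
      rw [← List.head?_drop, hdrop]; rfl
    by_cases hr : r < 0
    · rw [PySem.List.enumerate_cons, List.foldl_cons]
      simp only [hr, if_pos]
      have hc : (k : Int) + 1 = ((k + 1 : Nat) : Int) := by push_cast; ring
      rw [hc, ih (k + 1) (k + 1) _ (le_refl _) hdrop']
      have hslice : PySem.List.slice refs (some (s : Int)) (some (k : Int))
          = (refs.drop s).take (k - s) := PySem.List.slice_natCast refs s k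
      simp [pvCore, hr, hslice, hdrop']
    · rw [PySem.List.enumerate_cons, List.foldl_cons]
      simp only [hr, if_neg, not_false_iff]
      have hc : (k : Int) + 1 = ((k + 1 : Nat) : Int) := by push_cast; ring
      rw [hc, ih (k + 1) s _ (Nat.le_succ_of_le hsk) hdrop']
      have htake : (refs.drop s).take (k + 1 - s) = (refs.drop s).take (k - s) ++ [r] := by
        have h1 : k + 1 - s = (k - s) + 1 := by omega
        have h2 : (refs.drop s)[k - s]? = some r := by
          rw [List.getElem?_drop]
          have : s + (k - s) = k := by omega
          rw [this, hget]
        rw [h1, List.take_add_one, h2]; rfl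
      simp [pvCore, hr, htake]

-- ===== VERDICT (by name: the statement is the Claim_ definition above) =====
theorem RestoreFaces_spec : Claim_equal_RestoreFaces := by
  intro references _
  show RestoreFaces references = RestoreFaces_alt references
  unfold RestoreFaces RestoreFaces_alt
  rw [pvCoreA references [] []]
  have hb := pvCoreB references references 0 0 [] (le_refl _) (by simp)
  simp only [Nat.cast_zero, List.drop_zero, Nat.sub_zero, List.take_zero] at hb
  simp [hb]
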